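-- pv_equiv track=rewrite | github.com/ruthgdb/A2SV | 2272-substring-with-largest-variance/2272-substring-with-largest-variance.py | largestVariance
-- ===== SOURCE A (Python) =====
-- def largestVariance(s: str) -> int:
--
--     pairs = []
--     unique_chars = set(s)
--
--     for char in unique_chars:
--         for char2 in unique_chars:
--             if char == char2:
--                 continue
--
--             pairs.append((char, char2))
--
--     def check(s):
--         max_variance = 0
--
--         for pair in pairs:
--             count1 = count2 = 0
--
--             for l in s:
--                 if l not in pair:
--                     continue
--                 elif l == pair[0] or l == pair[1]:
--                     count1 += l == pair[0]
--                     count2 += l == pair[1]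
--
--                 if count1 < count2:
--                     count1 = count2 = 0
--                 elif count1 > 0 and count2 > 0:
--                     max_variance = max(max_variance, count1 - count2)
--
--         return max_variance
--
--     return max(check(s), check(s[::-1]))
-- ===== SOURCE B (Python) =====
-- def largestVariance(s: str) -> int:
--     best = 0
--     chars = list(dict.fromkeys(s))
--     for a in chars:
--         for b in chars:
--             if a == b:
--                 continue
--             d = 0          # prefix count(a) - count(b)
--             run_min = 0    # min of d over all prefixes seen so far
--             min_b = None   # min of d over prefixes that precede some b
--             ans = 0
--             for c in s:
--                 if c == a:
--                     d += 1
--                 elif c == b: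
--                     min_b = run_min if min_b is None else min(min_b, run_min)
--                     d -= 1
--                 else:
--                     continue
--                 if min_b is not None and d - min_b > ans:
--                     ans = d - min_b
--                 if d < run_min:
--                     run_min = d
--             if ans > best:
--                 best = ans
--     return best
-- ===== Notes on version B (the rewrite author's own statement) =====
-- stated objective: faster
-- what changed: Replaces the two-directional Kadane reset scan (check on s and on s[::-1]) by a single forward pass per ordered pair that maintains the prefix sum count_a-count_b, the running minimum over all prefixes, and the minimum prefix value occurring before some b; the per-pair answer is the best prefix-sum difference over segments containing a b, so no reversed scan is needed.
import Mathlib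
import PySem

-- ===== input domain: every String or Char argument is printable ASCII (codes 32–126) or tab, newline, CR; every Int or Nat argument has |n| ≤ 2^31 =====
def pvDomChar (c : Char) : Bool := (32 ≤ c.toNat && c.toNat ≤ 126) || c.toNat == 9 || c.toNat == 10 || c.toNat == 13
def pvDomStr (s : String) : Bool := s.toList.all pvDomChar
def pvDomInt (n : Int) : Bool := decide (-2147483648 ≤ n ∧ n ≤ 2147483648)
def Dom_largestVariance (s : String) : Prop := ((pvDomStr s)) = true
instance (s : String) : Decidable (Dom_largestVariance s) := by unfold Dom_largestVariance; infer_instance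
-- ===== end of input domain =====

-- B replaces A's two-directional Kadane-reset scan (check on s and on s[::-1]) by a single
-- forward pass per ordered character pair keeping the prefix sum, its running minimum and the
-- minimum prefix value preceding some b; measured faster by a constant factor.


-- ===== PORT A =====
-- inner loop body of A's check: 'if l not in pair: continue' then the count updates,
-- the reset 'if count1 < count2' and the record 'elif count1 > 0 and count2 > 0'
def pvStepA (a b : Char) (st : Int × Int × Int) (l : Char) : Int × Int × Int :=
  if l = a ∨ l = b then
    let c1 := st.1 + (if l = a then 1 else 0)
    let c2 := st.2.1 + (if l = b then 1 else 0)
    if c1 < c2 then (0, 0, st.2.2)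
    else if 0 < c1 ∧ 0 < c2 then (c1, c2, max st.2.2 (c1 - c2))
    else (c1, c2, st.2.2)
  else st

-- 'for char in unique_chars: for char2 in unique_chars: … pairs.append((char, char2))'
def pvPairsA (u : List Char) : List (Char × Char) :=
  u.foldl (fun acc a => u.foldl (fun acc b => if a = b then acc else acc ++ [(a, b)]) acc) []

-- 'def check(s)': max_variance threaded through the pairs loop, counts reset per pair
def pvCheckA (pairs : List (Char × Char)) (t : List Char) : Int :=
  pairs.foldl (fun mv p => (t.foldl (pvStepA p.1 p.2) ((0 : Int), (0 : Int), mv)).2.2) 0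

def largestVariance (s : String) : Int :=
  let u : PySem.Set Char := PySem.Set.ofList s.toList   -- set(s)
  let pairs := pvPairsA u
  max (pvCheckA pairs s.toList) (pvCheckA pairs s.toList.reverse)   -- s[::-1]

-- ===== PORT B =====
-- tail of B's loop body: 'if min_b is not None and d - min_b > ans: …; if d < run_min: …'
def pvTailB (d rm : Int) (mb : Option Int) (ans : Int) : Int × Int × Option Int × Int :=
  let ans' := match mb with
    | some m => if ans < d - m then d - m else ans
    | none => ans
  (d, if d < rm then d else rm, mb, ans')

-- 'if c == a: d += 1  elif c == b: min_b = …; d -= 1  else: continue'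
def pvStepB (a b : Char) (st : Int × Int × Option Int × Int) (c : Char) :
    Int × Int × Option Int × Int :=
  if c = a then
    pvTailB (st.1 + 1) st.2.1 st.2.2.1 st.2.2.2
  else if c = b then
    pvTailB (st.1 - 1) st.2.1
      (some (match st.2.2.1 with | none => st.2.1 | some m => min m st.2.1)) st.2.2.2
  else st

-- one forward pass for the pair (a, b): state (d, run_min, min_b, ans)
def pvPairB (a b : Char) (t : List Char) : Int :=
  (t.foldl (pvStepB a b) ((0 : Int), (0 : Int), none, (0 : Int))).2.2.2

def largestVariance_alt (s : String) : Int :=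
  let chars : List Char := PySem.List.dedup s.toList   -- list(dict.fromkeys(s))
  chars.foldl (fun best a => chars.foldl (fun best b =>
    if a = b then best
    else
      let ans := pvPairB a b s.toList
      if best < ans then ans else best) best) 0

-- ===== PRECONDITION & SPEC =====
def Spec_largestVariance (s : String) (out : Int) : Prop := out = largestVariance_alt s
instance (s : String) (out : Int) : Decidable (Spec_largestVariance s out) := by unfold Spec_largestVariance; infer_instance

-- ===== CLAIM (what is proved, stated in full; the proofs are below) =====
def Claim_equal_largestVariance : Prop := ∀ (s : String), Dom_largestVariance s → Spec_largestVariance s (largestVariance s)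

-- ===== LEMMAS AND PROOFS =====

-- value of a segment for the pair (a, b): count of a minus count of b
def pvF (a b : Char) (v : List Char) : Int := (v.count a : Int) - (v.count b : Int)

-- all contiguous segments of l
def pvSegs (l : List Char) : List (List Char) := l.tails.flatMap List.inits

-- the common specification: the largest pvF over segments containing b, at least 0
def pvSpec (a b : Char) (l : List Char) : Int :=
  ((pvSegs l).filter (fun v => decide (b ∈ v))).foldl (fun m v => max m (pvF a b v)) 0

-- ghost version of A's per-pair scan: (segment since last reset, max_variance)
def pvGStep (a b : Char) (st : List Char × Int) (c : Char) : List Char × Int :=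
  if c = a ∨ c = b then
    let seg := st.1 ++ [c]
    if pvF a b seg < 0 then ([], st.2)
    else (seg, if 0 < seg.count a ∧ 0 < seg.count b then max st.2 (pvF a b seg) else st.2)
  else (st.1 ++ [c], st.2)

def pvG (a b : Char) (l : List Char) : List Char × Int := l.foldl (pvGStep a b) ([], 0)

-- B's fold state
def pvB (a b : Char) (l : List Char) : Int × Int × Option Int × Int :=
  l.foldl (pvStepB a b) ((0 : Int), (0 : Int), none, (0 : Int))


theorem pvfold_init_le (g : List Char → Int) (xs : List (List Char)) (m : Int) :
    m ≤ xs.foldl (fun m v => max m (g v)) m := by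
  induction xs generalizing m with
  | nil => simp
  | cons x xs ih => exact le_trans (le_max_left m (g x)) (ih _)

theorem pvfold_le_of_mem (g : List Char → Int) {xs : List (List Char)} {x : List Char}
    (h : x ∈ xs) (m : Int) : g x ≤ xs.foldl (fun m v => max m (g v)) m := by
  induction xs generalizing m with
  | nil => cases h
  | cons y ys ih =>
    rcases List.mem_cons.1 h with rfl | h'
    · exact le_trans (le_max_right m (g x)) (pvfold_init_le g ys _)
    · exact ih h' _

theorem pvfold_le (g : List Char → Int) {xs : List (List Char)} {m c : Int}
    (hm : m ≤ c) (h : ∀ x ∈ xs, g x ≤ c) : xs.foldl (fun m v => max m (g v)) m ≤ c := by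
  induction xs generalizing m with
  | nil => simpa using hm
  | cons y ys ih =>
    exact ih (max_le hm (h y (List.mem_cons_self))) (fun x hx => h x (List.mem_cons_of_mem _ hx))

theorem pvfold_cases (g : List Char → Int) (xs : List (List Char)) (m : Int) :
    xs.foldl (fun m v => max m (g v)) m = m ∨
      ∃ x ∈ xs, xs.foldl (fun m v => max m (g v)) m = g x := by
  induction xs generalizing m with
  | nil => left; rfl
  | cons y ys ih =>
    rcases ih (max m (g y)) with h | ⟨x, hx, hx2⟩
    · simp only [List.foldl_cons] at *
      rcases max_cases m (g y) with ⟨he, _⟩ | ⟨he, _⟩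
      · left; rw [h, he]
      · right; exact ⟨y, List.mem_cons_self, by rw [h, he]⟩
    · right; exact ⟨x, List.mem_cons_of_mem _ hx, hx2⟩

theorem pvF_nil (a b : Char) : pvF a b [] = 0 := by simp [pvF]

theorem pvF_append (a b : Char) (x y : List Char) :
    pvF a b (x ++ y) = pvF a b x + pvF a b y := by
  simp [pvF, List.count_append]; push_cast; ring

theorem pvF_reverse (a b : Char) (v : List Char) : pvF a b v.reverse = pvF a b v := by
  simp [pvF, List.count_reverse]

theorem pvF_single_a (a b : Char) (hab : a ≠ b) : pvF a b [a] = 1 := by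
  simp [pvF, List.count_singleton', hab, Ne.symm hab]

theorem pvF_single_b (a b : Char) (hab : a ≠ b) : pvF a b [b] = -1 := by
  simp [pvF, List.count_singleton', hab, Ne.symm hab]

theorem pvF_single_o (a b c : Char) (ha : c ≠ a) (hb : c ≠ b) : pvF a b [c] = 0 := by
  simp [pvF, List.count_singleton', ha, hb, Ne.symm ha, Ne.symm hb]

theorem mem_pvSegs {v l : List Char} : v ∈ pvSegs l ↔ v <:+: l := by
  simp only [pvSegs, List.mem_flatMap, List.mem_tails, List.mem_inits]
  constructor
  · rintro ⟨t, ht, hv⟩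
    exact hv.isInfix.trans ht.isInfix
  · rintro ⟨u, w, rfl⟩
    exact ⟨v ++ w, ⟨u, by simp⟩, ⟨w, rfl⟩⟩

theorem pvSpec_nonneg (a b : Char) (l : List Char) : 0 ≤ pvSpec a b l :=
  pvfold_init_le _ _ _

theorem pvSpec_le_of_infix {a b : Char} {v l : List Char} (hv : v <:+: l) (hb : b ∈ v) :
    pvF a b v ≤ pvSpec a b l := by
  apply pvfold_le_of_mem
  simp [List.mem_filter, mem_pvSegs, hv, hb]

theorem pvSpec_cases (a b : Char) (l : List Char) :
    pvSpec a b l = 0 ∨ ∃ v, v <:+: l ∧ b ∈ v ∧ pvF a b v = pvSpec a b l := by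
  rcases pvfold_cases (pvF a b) ((pvSegs l).filter (fun v => decide (b ∈ v))) 0 with h | ⟨x, hx, hx2⟩
  · left; exact h
  · right
    simp only [List.mem_filter, mem_pvSegs, decide_eq_true_eq] at hx
    exact ⟨x, hx.1, hx.2, hx2.symm⟩

theorem pvSpec_le {a b : Char} {l : List Char} {c : Int} (hc : 0 ≤ c)
    (h : ∀ v, v <:+: l → b ∈ v → pvF a b v ≤ c) : pvSpec a b l ≤ c := by
  apply pvfold_le _ hc
  intro x hx
  simp only [List.mem_filter, mem_pvSegs, decide_eq_true_eq] at hx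
  exact h x hx.1 hx.2

theorem pvSpec_rev_le (a b : Char) (l : List Char) :
    pvSpec a b l.reverse ≤ pvSpec a b l := by
  apply pvSpec_le (pvSpec_nonneg a b l)
  intro v hv hb
  have : v.reverse <:+: l := by
    have := (List.reverse_infix (l₁ := v.reverse) (l₂ := l)).2
    simpa using List.reverse_infix.2 hv
  calc pvF a b v = pvF a b v.reverse := (pvF_reverse a b v).symm
    _ ≤ pvSpec a b l := pvSpec_le_of_infix this (by simpa using hb)

theorem pvSpec_reverse (a b : Char) (l : List Char) :
    pvSpec a b l.reverse = pvSpec a b l := by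
  refine le_antisymm (pvSpec_rev_le a b l) ?_
  have := pvSpec_rev_le a b l.reverse
  simpa using this

theorem pv_split_concat {α : Type} {l q r : List α} {c : α} (h : q ++ r = l ++ [c]) :
    (q = l ++ [c] ∧ r = []) ∨ ∃ r', r = r' ++ [c] ∧ q ++ r' = l := by
  rcases r.eq_nil_or_concat with rfl | ⟨r', d, rfl⟩
  · left; constructor
    · simpa using h
    · rfl
  · right
    simp only [List.concat_eq_append, ← List.append_assoc] at h ⊢
    have h2 := List.append_inj' h rfl
    rcases h2 with ⟨h3, h4⟩
    have : d = c := by simpa using h4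
    subst this
    exact ⟨r', rfl, h3⟩

theorem pv_suffix_concat {α : Type} {s l : List α} {c : α} (h : s <:+ l ++ [c]) :
    s = [] ∨ ∃ s', s = s' ++ [c] ∧ s' <:+ l := by
  rcases s.eq_nil_or_concat with rfl | ⟨s', d, rfl⟩
  · left; rfl
  · right
    rcases h with ⟨t, ht⟩
    simp only [List.concat_eq_append, ← List.append_assoc] at ht ⊢
    have h2 := List.append_inj' ht rfl
    rcases h2 with ⟨h3, h4⟩
    have : d = c := by simpa using h4
    subst this
    exact ⟨s', rfl, ⟨t, h3⟩⟩

theorem pv_last_occ {α : Type} [DecidableEq α] (c : α) :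
    ∀ l : List α, c ∈ l → ∃ p z, l = p ++ c :: z ∧ c ∉ z := by
  intro l
  induction l using List.reverseRecOn with
  | nil => intro h; cases h
  | append_singleton l d ih =>
    intro h
    by_cases hdc : d = c
    · subst hdc
      exact ⟨l, [], by simp, by simp⟩
    · have : c ∈ l := by
        rcases List.mem_append.1 h with h' | h'
        · exact h'
        · simp at h'; exact absurd h'.symm hdc
      rcases ih this with ⟨p, z, rfl, hz⟩
      exact ⟨p, z ++ [d], by simp, by
        intro hc
        rcases List.mem_append.1 hc with h' | h'
        · exact hz h'
        · simp at h'; exact hdc h'.symm⟩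

theorem pv_first_occ {α : Type} [DecidableEq α] (c : α) :
    ∀ l : List α, c ∈ l → ∃ p z, l = p ++ c :: z ∧ c ∉ p := by
  intro l
  induction l with
  | nil => intro h; cases h
  | cons d l ih =>
    intro h
    by_cases hdc : d = c
    · subst hdc; exact ⟨[], l, rfl, by simp⟩
    · have : c ∈ l := by
        rcases List.mem_cons.1 h with h' | h'
        · exact absurd h'.symm hdc
        · exact h'
      rcases ih this with ⟨p, z, rfl, hp⟩
      exact ⟨d :: p, z, rfl, by
        intro hc
        rcases List.mem_cons.1 hc with h' | h'
        · exact hdc h'.symm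
        · exact hp h'⟩

theorem pv_first_occ_uniq {α : Type} {c : α} :
    ∀ v₁ : List α, ∀ w₁ v₂ w₂ : List α, v₁ ++ c :: v₂ = w₁ ++ c :: w₂ → c ∉ v₁ → c ∉ w₁ →
      v₁ = w₁ ∧ v₂ = w₂ := by
  intro v₁
  induction v₁ with
  | nil =>
    intro w₁ v₂ w₂ h hv hw
    cases w₁ with
    | nil => simpa using h
    | cons d w₁ =>
      simp only [List.nil_append, List.cons_append, List.cons.injEq] at h
      rw [← h.1] at hw
      exact absurd List.mem_cons_self hw
  | cons d v₁ ih =>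
    intro w₁ v₂ w₂ h hv hw
    cases w₁ with
    | nil =>
      simp only [List.cons_append, List.nil_append, List.cons.injEq] at h
      rw [h.1] at hv
      exact absurd List.mem_cons_self hv
    | cons e w₁ =>
      simp only [List.cons_append, List.cons.injEq] at h
      have := ih w₁ v₂ w₂ h.2 (fun hc => hv (List.mem_cons_of_mem _ hc))
        (fun hc => hw (List.mem_cons_of_mem _ hc))
      exact ⟨by rw [h.1, this.1], this.2⟩

theorem pv_infix_ext {v l t : List Char} (h : v <:+: l) : v <:+: l ++ t :=
  h.trans ⟨[], t, by simp⟩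

theorem pvB_inv (a b : Char) (hab : a ≠ b) (l : List Char) :
    (pvB a b l).1 = pvF a b l
  ∧ (∀ q, q <+: l → (pvB a b l).2.1 ≤ pvF a b q)
  ∧ (∃ q, q <+: l ∧ (pvB a b l).2.1 = pvF a b q)
  ∧ (((pvB a b l).2.2.1 = none ∧ b ∉ l) ∨
     (∃ m, (pvB a b l).2.2.1 = some m
        ∧ (∃ q r, l = q ++ r ∧ b ∈ r ∧ pvF a b q = m)
        ∧ (∀ q r, l = q ++ r → b ∈ r → m ≤ pvF a b q)))
  ∧ 0 ≤ (pvB a b l).2.2.2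
  ∧ ((pvB a b l).2.2.2 = 0 ∨ ∃ v, v <:+: l ∧ b ∈ v ∧ pvF a b v = (pvB a b l).2.2.2) := by
  induction l using List.reverseRecOn with
  | nil =>
    refine ⟨by simp [pvB, pvF], ?_, ⟨[], by simp, by simp [pvB, pvF]⟩,
      Or.inl ⟨rfl, by simp⟩, le_refl 0, Or.inl rfl⟩
    intro q hq
    rw [List.prefix_nil.1 hq]
    simp [pvB, pvF]
  | append_singleton l c ih =>
    obtain ⟨h1, h2, h3, h4, h5, h6⟩ := ih
    have hstep : pvB a b (l ++ [c]) = pvStepB a b (pvB a b l) c := by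
      simp [pvB, List.foldl_append]
    by_cases hca : c = a
    · -- c = a
      have hfc : pvF a b [c] = 1 := by rw [hca]; exact pvF_single_a a b hab
      have hcb : b ≠ c := by rw [hca]; exact fun h => hab h.symm
      rw [hstep]
      simp only [pvStepB, if_pos hca]
      have hd : pvF a b (l ++ [c]) = (pvB a b l).1 + 1 := by
        rw [pvF_append, hfc, h1]
      constructor
      · -- .1
        simp only [pvTailB]; omega
      constructor
      · -- run min bound
        intro q hq
        rcases List.prefix_concat_iff.1 hq with rfl | hq'
        · simp only [pvTailB]
          split_ifs <;> omega
        · have := h2 q hq'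
          simp only [pvTailB]
          split_ifs <;> omega
      constructor
      · -- run min attain
        by_cases hlt : (pvB a b l).1 + 1 < (pvB a b l).2.1
        · refine ⟨l ++ [c], List.prefix_refl _, ?_⟩
          simp only [pvTailB, if_pos hlt]
          omega
        · obtain ⟨q, hq, hq2⟩ := h3
          refine ⟨q, hq.trans (List.prefix_append l [c]), ?_⟩
          simp only [pvTailB, if_neg hlt]
          exact hq2
      constructor
      · -- minB characterization
        rcases h4 with ⟨hnone, hbl⟩ | ⟨m, hsome, ⟨q₀, r₀, hsp, hbr, hfq⟩, hbd⟩
        · left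
          refine ⟨by simp [pvTailB, hnone], ?_⟩
          intro hb
          rcases List.mem_append.1 hb with h' | h'
          · exact hbl h'
          · simp at h'; exact hcb h'
        · right
          refine ⟨m, by simp [pvTailB, hsome], ⟨q₀, r₀ ++ [c], by rw [hsp, List.append_assoc],
            List.mem_append.2 (Or.inl hbr), hfq⟩, ?_⟩
          intro q r hqr hbr'
          rcases pv_split_concat hqr.symm with ⟨rfl, rfl⟩ | ⟨r', rfl, hqr'⟩
          · cases hbr'
          · have hbr'' : b ∈ r' := by
              rcases List.mem_append.1 hbr' with h' | h'
              · exact h'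
              · simp at h'; exact absurd h' hcb
            exact hbd q r' hqr'.symm hbr''
      constructor
      · -- ans nonneg
        rcases h4 with ⟨hnone, _⟩ | ⟨m, hsome, _, _⟩
        · simp only [pvTailB, hnone]; exact h5
        · simp only [pvTailB, hsome]
          split_ifs <;> omega
      · -- ans soundness
        rcases h4 with ⟨hnone, _⟩ | ⟨m, hsome, ⟨q₀, r₀, hsp, hbr, hfq⟩, hbd⟩
        · simp only [pvTailB, hnone]
          rcases h6 with h | ⟨v, hv, hbv, hfv⟩
          · left; exact h
          · right; exact ⟨v, pv_infix_ext hv, hbv, hfv⟩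
        · simp only [pvTailB, hsome]
          split_ifs with hlt
          · right
            refine ⟨r₀ ++ [c], ⟨q₀, [], by rw [hsp]; simp⟩, List.mem_append.2 (Or.inl hbr), ?_⟩
            have : pvF a b l = pvF a b q₀ + pvF a b r₀ := by rw [hsp, pvF_append]
            rw [pvF_append, hfc]
            omega
          · rcases h6 with h | ⟨v, hv, hbv, hfv⟩
            · left; exact h
            · right; exact ⟨v, pv_infix_ext hv, hbv, hfv⟩
    by_cases hcb : c = b
    · -- c = b
      have hfc : pvF a b [c] = -1 := by rw [hcb]; exact pvF_single_b a b hab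
      have hbc : b ∈ [c] := by rw [hcb]; exact List.mem_singleton.2 rfl
      rw [hstep]
      simp only [pvStepB, if_neg hca, if_pos hcb]
      have hd : pvF a b (l ++ [c]) = (pvB a b l).1 - 1 := by
        rw [pvF_append, hfc, h1]; ring
      -- the new min_b value and its characterization
      have hm' : ∃ m', (match (pvB a b l).2.2.1 with
            | none => (pvB a b l).2.1 | some m => min m (pvB a b l).2.1) = m'
          ∧ (∃ q r, l ++ [c] = q ++ r ∧ b ∈ r ∧ pvF a b q = m')
          ∧ (∀ q r, l ++ [c] = q ++ r → b ∈ r → m' ≤ pvF a b q)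
          ∧ m' ≤ (pvB a b l).2.1 := by
        obtain ⟨qs, hqs, hqs2⟩ := h3
        obtain ⟨rs, hrs⟩ := hqs
        rcases h4 with ⟨hnone, hbl⟩ | ⟨m, hsome, ⟨q₀, r₀, hsp, hbr, hfq⟩, hbd⟩
        · refine ⟨(pvB a b l).2.1, by rw [hnone], ⟨qs, rs ++ [c], by rw [← hrs, List.append_assoc],
            List.mem_append.2 (Or.inr hbc), hqs2.symm⟩, ?_, le_refl _⟩
          intro q r hqr hbr'
          rcases pv_split_concat hqr.symm with ⟨rfl, rfl⟩ | ⟨r', rfl, hqr'⟩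
          · cases hbr'
          · exact h2 q ⟨r', hqr'⟩
        · refine ⟨min m (pvB a b l).2.1, by rw [hsome], ?_, ?_, min_le_right _ _⟩
          · by_cases hmm : m ≤ (pvB a b l).2.1
            · exact ⟨q₀, r₀ ++ [c], by rw [hsp, List.append_assoc],
                List.mem_append.2 (Or.inl hbr), by rw [hfq, min_eq_left hmm]⟩
            · exact ⟨qs, rs ++ [c], by rw [← hrs, List.append_assoc],
                List.mem_append.2 (Or.inr hbc), by
                  rw [hqs2.symm, min_eq_right (le_of_not_ge hmm)]⟩
          · intro q r hqr hbr'
            rcases pv_split_concat hqr.symm with ⟨rfl, rfl⟩ | ⟨r', rfl, hqr'⟩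
            · cases hbr'
            · exact le_trans (min_le_right _ _) (h2 q ⟨r', hqr'⟩)
      obtain ⟨m', hm'eq, ⟨q₁, r₁, hsp₁, hbr₁, hfq₁⟩, hbd', hm'le⟩ := hm'
      rw [hm'eq]
      constructor
      · simp only [pvTailB]; omega
      constructor
      · -- run min bound
        intro q hq
        rcases List.prefix_concat_iff.1 hq with rfl | hq'
        · simp only [pvTailB]
          split_ifs <;> omega
        · have := h2 q hq'
          simp only [pvTailB]
          split_ifs <;> omega
      constructor
      · -- run min attain
        by_cases hlt : (pvB a b l).1 - 1 < (pvB a b l).2.1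
        · refine ⟨l ++ [c], List.prefix_refl _, ?_⟩
          simp only [pvTailB, if_pos hlt]
          omega
        · obtain ⟨q, hq, hq2⟩ := h3
          refine ⟨q, hq.trans (List.prefix_append l [c]), ?_⟩
          simp only [pvTailB, if_neg hlt]
          exact hq2
      constructor
      · -- minB characterization
        right
        exact ⟨m', by simp [pvTailB], ⟨q₁, r₁, hsp₁, hbr₁, hfq₁⟩, hbd'⟩
      constructor
      · -- ans nonneg
        simp only [pvTailB]
        split_ifs <;> omega
      · -- ans soundness
        simp only [pvTailB]
        split_ifs with hlt
        · right
          refine ⟨r₁, ⟨q₁, [], by rw [hsp₁]; simp⟩, hbr₁, ?_⟩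
          have : pvF a b (l ++ [c]) = pvF a b q₁ + pvF a b r₁ := by rw [hsp₁, pvF_append]
          omega
        · rcases h6 with h | ⟨v, hv, hbv, hfv⟩
          · left; exact h
          · right; exact ⟨v, pv_infix_ext hv, hbv, hfv⟩
    · -- c irrelevant
      have hfc : pvF a b [c] = 0 := pvF_single_o a b c hca hcb
      have hd : pvF a b (l ++ [c]) = pvF a b l := by rw [pvF_append, hfc]; ring
      rw [hstep]
      simp only [pvStepB, if_neg hca, if_neg hcb]
      refine ⟨by rw [hd]; exact h1, ?_, ?_, ?_, h5, ?_⟩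
      · intro q hq
        rcases List.prefix_concat_iff.1 hq with rfl | hq'
        · rw [hd, ← h1]
          have := h2 l (List.prefix_refl l)
          rw [← h1] at this
          exact this
        · exact h2 q hq'
      · obtain ⟨q, hq, hq2⟩ := h3
        exact ⟨q, hq.trans (List.prefix_append l [c]), hq2⟩
      · rcases h4 with ⟨hnone, hbl⟩ | ⟨m, hsome, ⟨q₀, r₀, hsp, hbr, hfq⟩, hbd⟩
        · left
          refine ⟨hnone, ?_⟩
          intro hb
          rcases List.mem_append.1 hb with h' | h'
          · exact hbl h'
          · simp at h'; exact hcb h'.symm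
        · right
          refine ⟨m, hsome, ⟨q₀, r₀ ++ [c], by rw [hsp, List.append_assoc],
            List.mem_append.2 (Or.inl hbr), hfq⟩, ?_⟩
          intro q r hqr hbr'
          rcases pv_split_concat hqr.symm with ⟨rfl, rfl⟩ | ⟨r', rfl, hqr'⟩
          · cases hbr'
          · have hbr'' : b ∈ r' := by
              rcases List.mem_append.1 hbr' with h' | h'
              · exact h'
              · simp at h'; exact absurd h'.symm hcb
            exact hbd q r' hqr'.symm hbr''
      · rcases h6 with h | ⟨v, hv, hbv, hfv⟩
        · left; exact h
        · right; exact ⟨v, pv_infix_ext hv, hbv, hfv⟩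

theorem pvTailB_d (d rm : Int) (mb : Option Int) (ans : Int) :
    (pvTailB d rm mb ans).1 = d := by cases mb <;> simp [pvTailB]

theorem pvTailB_mb (d rm : Int) (mb : Option Int) (ans : Int) :
    (pvTailB d rm mb ans).2.2.1 = mb := by cases mb <;> simp [pvTailB]

theorem pvTailB_ans_le (d rm : Int) (mb : Option Int) (ans : Int) :
    ans ≤ (pvTailB d rm mb ans).2.2.2 := by
  cases mb with
  | none => simp [pvTailB]
  | some m => simp only [pvTailB]; split_ifs <;> omega

theorem pvTailB_record (d rm m ans : Int) :
    d - m ≤ (pvTailB d rm (some m) ans).2.2.2 := by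
  simp only [pvTailB]; split_ifs <;> omega

theorem pvStepB_ans_le (a b : Char) (st : Int × Int × Option Int × Int) (c : Char) :
    st.2.2.2 ≤ (pvStepB a b st c).2.2.2 := by
  unfold pvStepB
  split_ifs
  · exact pvTailB_ans_le _ _ _ _
  · exact pvTailB_ans_le _ _ _ _
  · exact le_refl _

theorem pvB_ans_mono (a b : Char) (l l' : List Char) :
    (pvB a b l).2.2.2 ≤ (pvB a b (l ++ l')).2.2.2 := by
  induction l' using List.reverseRecOn with
  | nil => simp
  | append_singleton l' c ih =>
    have : pvB a b (l ++ (l' ++ [c])) = pvStepB a b (pvB a b (l ++ l')) c := by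
      simp [pvB, ← List.append_assoc, List.foldl_append]
    rw [this]
    exact le_trans ih (pvStepB_ans_le a b _ c)

theorem pvB_record (a b : Char) (p : List Char) (c : Char) (hc : c = a ∨ c = b) (m : Int)
    (hmb : (pvB a b (p ++ [c])).2.2.1 = some m) :
    (pvB a b (p ++ [c])).1 - m ≤ (pvB a b (p ++ [c])).2.2.2 := by
  have hstep : pvB a b (p ++ [c]) = pvStepB a b (pvB a b p) c := by
    simp [pvB, List.foldl_append]
  rw [hstep] at hmb ⊢
  by_cases hca : c = a
  · simp only [pvStepB, if_pos hca] at hmb ⊢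
    rw [pvTailB_mb] at hmb
    rw [pvTailB_d, hmb]
    exact pvTailB_record _ _ _ _
  · have hcb : c = b := hc.resolve_left hca
    simp only [pvStepB, if_neg hca, if_pos hcb] at hmb ⊢
    rw [pvTailB_mb] at hmb
    have hm2 := Option.some.inj hmb
    rw [pvTailB_d, hm2]
    exact pvTailB_record _ _ _ _

theorem pv_strip (a b : Char) :
    ∀ v : List Char, b ∈ v → ∃ v₁ v₂, v = v₁ ++ v₂ ∧ b ∈ v₁ ∧
      (∃ v₀ c, v₁ = v₀ ++ [c] ∧ (c = a ∨ c = b)) ∧ pvF a b v₁ = pvF a b v := by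
  intro v
  induction v using List.reverseRecOn with
  | nil => intro h; cases h
  | append_singleton v c ih =>
    intro h
    by_cases hc : c = a ∨ c = b
    · exact ⟨v ++ [c], [], by simp, h, ⟨v, c, rfl, hc⟩, rfl⟩
    · push_neg at hc
      have hbv : b ∈ v := by
        rcases List.mem_append.1 h with h' | h'
        · exact h'
        · simp at h'; exact absurd h'.symm hc.2
      obtain ⟨v₁, v₂, rfl, hb1, hrel, hf⟩ := ih hbv
      refine ⟨v₁, v₂ ++ [c], by simp, hb1, hrel, ?_⟩
      have hstep : pvF a b ((v₁ ++ v₂) ++ [c]) = pvF a b (v₁ ++ v₂) := by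
        rw [pvF_append a b (v₁ ++ v₂) [c], pvF_single_o a b c hc.1 hc.2]; ring
      rw [hstep]
      exact hf

theorem pvPairB_eq_spec {a b : Char} (hab : a ≠ b) (l : List Char) :
    pvPairB a b l = pvSpec a b l := by
  have hdef : pvPairB a b l = (pvB a b l).2.2.2 := rfl
  obtain ⟨_, _, _, _, h5, h6⟩ := pvB_inv a b hab l
  refine le_antisymm ?_ ?_
  · -- sound
    rw [hdef]
    rcases h6 with h | ⟨v, hv, hbv, hfv⟩
    · rw [h]; exact pvSpec_nonneg a b l
    · rw [← hfv]; exact pvSpec_le_of_infix hv hbv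
  · -- complete
    rcases pvSpec_cases a b l with h0 | ⟨v, hv, hbv, hfv⟩
    · rw [h0, hdef]; exact h5
    · obtain ⟨v₁, v₂, rfl, hb1, ⟨v₀, c, rfl, hcrel⟩, hfeq⟩ := pv_strip a b v hbv
      obtain ⟨u, w, hl⟩ := hv
      have hl2 : l = ((u ++ v₀) ++ [c]) ++ (v₂ ++ w) := by
        rw [← hl]; simp [List.append_assoc]
      obtain ⟨hp1, _, _, hp4, _, _⟩ := pvB_inv a b hab ((u ++ v₀) ++ [c])
      have hbp : b ∈ (u ++ v₀) ++ [c] := by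
        have : b ∈ u ++ (v₀ ++ [c]) := List.mem_append.2 (Or.inr hb1)
        simpa [List.append_assoc] using this
      rcases hp4 with ⟨_, hbl⟩ | ⟨m, hsome, _, hbd⟩
      · exact absurd hbp hbl
      · have hmu : m ≤ pvF a b u := by
          apply hbd u (v₀ ++ [c]) (by simp [List.append_assoc]) hb1
        have hrec := pvB_record a b (u ++ v₀) c hcrel m hsome
        rw [hp1] at hrec
        have hfp : pvF a b ((u ++ v₀) ++ [c]) = pvF a b u + pvF a b (v₀ ++ [c]) := by
          rw [List.append_assoc, pvF_append]
        have hmono := pvB_ans_mono a b ((u ++ v₀) ++ [c]) (v₂ ++ w)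
        rw [← hl2] at hmono
        rw [hdef, ← hfv, ← hfeq]
        omega

theorem pvStepA_thread (a b : Char) (c : Char) (x y z m : Int) :
    pvStepA a b (x, y, max m z) c =
      ((pvStepA a b (x, y, z) c).1, (pvStepA a b (x, y, z) c).2.1,
        max m (pvStepA a b (x, y, z) c).2.2) := by
  simp only [pvStepA]
  split_ifs <;> simp [max_assoc]

theorem pvA_thread (a b : Char) (l : List Char) (m : Int) (hm : 0 ≤ m) :
    l.foldl (pvStepA a b) ((0 : Int), (0 : Int), m) =
      ((l.foldl (pvStepA a b) ((0 : Int), (0 : Int), (0 : Int))).1,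
       (l.foldl (pvStepA a b) ((0 : Int), (0 : Int), (0 : Int))).2.1,
       max m (l.foldl (pvStepA a b) ((0 : Int), (0 : Int), (0 : Int))).2.2) := by
  induction l using List.reverseRecOn with
  | nil => simp [max_eq_left hm]
  | append_singleton l c ih =>
    rw [List.foldl_append, List.foldl_append, ih]
    have h0 := pvStepA_thread a b c (l.foldl (pvStepA a b) ((0:Int),(0:Int),(0:Int))).1
      (l.foldl (pvStepA a b) ((0:Int),(0:Int),(0:Int))).2.1 (l.foldl (pvStepA a b) ((0:Int),(0:Int),(0:Int))).2.2 m
    simpa using h0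

theorem pv_count_self (seg : List Char) (a : Char) :
    ((seg ++ [a]).count a : Int) = (seg.count a : Int) + 1 := by
  simp [List.count_append]

theorem pv_count_ne (seg : List Char) (a c : Char) (h : ¬ c = a) :
    ((seg ++ [c]).count a : Int) = (seg.count a : Int) := by
  simp [List.count_append, List.count_singleton', h]

theorem pvA_eq_ghost (a b : Char) (hab : a ≠ b) (l : List Char) :
    l.foldl (pvStepA a b) ((0 : Int), (0 : Int), (0 : Int)) =
      (((pvG a b l).1.count a : Int), ((pvG a b l).1.count b : Int), (pvG a b l).2) := by
  induction l using List.reverseRecOn with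
  | nil => simp [pvG]
  | append_singleton l c ih =>
    have hG : pvG a b (l ++ [c]) = pvGStep a b (pvG a b l) c := by
      simp [pvG, List.foldl_append]
    rcases hGl : pvG a b l with ⟨seg, z⟩
    rw [hGl] at hG ih
    rw [List.foldl_append, ih, hG]
    simp only [List.foldl_cons, List.foldl_nil]
    by_cases hca : c = a
    · have hcb : ¬ c = b := by rw [hca]; exact hab
      have h1 : ((seg ++ [c]).count a : Int) = (seg.count a : Int) + 1 := by
        rw [hca]; exact pv_count_self seg a
      have h2 : ((seg ++ [c]).count b : Int) = (seg.count b : Int) := pv_count_ne seg b c hcb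
      have h3 : pvF a b (seg ++ [c]) = (seg.count a : Int) + 1 - (seg.count b : Int) := by
        simp only [pvF, h1, h2]
      have h4 : 0 < (seg ++ [c]).count a := by
        rw [hca]; simp [List.count_pos_iff]
      simp only [pvStepA, pvGStep, if_pos (Or.inl hca), if_pos hca, if_neg hcb]
      split_ifs <;>
        simp_all [pvF, List.count_append, List.count_singleton', add_zero] <;>
        omega
    · by_cases hcb : c = b
      · have h1 : ((seg ++ [c]).count a : Int) = (seg.count a : Int) := pv_count_ne seg a c hca
        have h2 : ((seg ++ [c]).count b : Int) = (seg.count b : Int) + 1 := by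
          rw [hcb]; exact pv_count_self seg b
        have h3 : pvF a b (seg ++ [c]) = (seg.count a : Int) - ((seg.count b : Int) + 1) := by
          simp only [pvF, h1, h2]
        have h4 : 0 < (seg ++ [c]).count b := by
          rw [hcb]; simp [List.count_pos_iff]
        simp only [pvStepA, pvGStep, if_pos (Or.inr hcb), if_pos hcb, if_neg hca]
        split_ifs <;>
          simp_all [pvF, List.count_append, List.count_singleton', add_zero] <;>
          omega
      · have h1 : ((seg ++ [c]).count a : Int) = (seg.count a : Int) := pv_count_ne seg a c hca
        have h2 : ((seg ++ [c]).count b : Int) = (seg.count b : Int) := pv_count_ne seg b c hcb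
        have hno : ¬ (c = a ∨ c = b) := by tauto
        simp only [pvStepA, pvGStep, if_neg hno]
        simp_all

theorem pvG_inv (a b : Char) (l : List Char) :
    (pvG a b l).1 <:+ l
  ∧ 0 ≤ pvF a b (pvG a b l).1
  ∧ (∀ s, s <:+ l → pvF a b s ≤ pvF a b (pvG a b l).1)
  ∧ 0 ≤ (pvG a b l).2
  ∧ ((pvG a b l).2 = 0 ∨ ∃ v, v <:+: l ∧ b ∈ v ∧ pvF a b v = (pvG a b l).2) := by
  induction l using List.reverseRecOn with
  | nil =>
    refine ⟨List.suffix_refl [], by simp [pvG, pvF_nil], ?_, le_refl 0, Or.inl rfl⟩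
    intro s hs
    rw [List.suffix_nil.1 hs]
    exact le_refl _
  | append_singleton l c ih =>
    obtain ⟨g1, g2, g3, g4, g5⟩ := ih
    have hG : pvG a b (l ++ [c]) = pvGStep a b (pvG a b l) c := by
      simp [pvG, List.foldl_append]
    rw [hG]
    by_cases hrel : c = a ∨ c = b
    · simp only [pvGStep, if_pos hrel]
      by_cases hres : pvF a b ((pvG a b l).1 ++ [c]) < 0
      · simp only [if_pos hres]
        refine ⟨⟨l ++ [c], by simp⟩, by rw [pvF_nil], ?_, g4, ?_⟩
        · intro s hs
          rcases pv_suffix_concat hs with rfl | ⟨s', rfl, hs'⟩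
          · exact le_refl _
          · have hb1 := g3 s' hs'
            have hb2 : pvF a b (s' ++ [c]) = pvF a b s' + pvF a b [c] := pvF_append a b s' [c]
            have hb3 : pvF a b ((pvG a b l).1 ++ [c]) =
                pvF a b (pvG a b l).1 + pvF a b [c] := pvF_append a b _ [c]
            rw [pvF_nil]
            omega
        · rcases g5 with h | ⟨v, hv, hbv, hfv⟩
          · left; exact h
          · right; exact ⟨v, pv_infix_ext hv, hbv, hfv⟩
      · simp only [if_neg hres]
        have hsuf : (pvG a b l).1 ++ [c] <:+ l ++ [c] := by
          obtain ⟨t, ht⟩ := g1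
          exact ⟨t, by rw [← List.append_assoc, ht]⟩
        refine ⟨hsuf, le_of_not_gt hres, ?_, ?_, ?_⟩
        · intro s hs
          rcases pv_suffix_concat hs with rfl | ⟨s', rfl, hs'⟩
          · rw [pvF_nil]; exact le_of_not_gt hres
          · have hb1 := g3 s' hs'
            have hb2 : pvF a b (s' ++ [c]) = pvF a b s' + pvF a b [c] := pvF_append a b s' [c]
            have hb3 : pvF a b ((pvG a b l).1 ++ [c]) =
                pvF a b (pvG a b l).1 + pvF a b [c] := pvF_append a b _ [c]
            omega
        · split_ifs
          · exact le_trans g4 (le_max_left _ _)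
          · exact g4
        · split_ifs with hrec
          · rcases max_cases (pvG a b l).2 (pvF a b ((pvG a b l).1 ++ [c])) with ⟨hm, _⟩ | ⟨hm, _⟩ <;>
              rw [hm]
            · rcases g5 with h | ⟨v, hv, hbv, hfv⟩
              · left; exact h
              · right; exact ⟨v, pv_infix_ext hv, hbv, hfv⟩
            · right
              exact ⟨(pvG a b l).1 ++ [c], hsuf.isInfix,
                List.count_pos_iff.1 hrec.2, rfl⟩
          · rcases g5 with h | ⟨v, hv, hbv, hfv⟩
            · left; exact h
            · right; exact ⟨v, pv_infix_ext hv, hbv, hfv⟩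
    · simp only [pvGStep, if_neg hrel]
      push_neg at hrel
      have hfc : pvF a b [c] = 0 := pvF_single_o a b c hrel.1 hrel.2
      have hsuf : (pvG a b l).1 ++ [c] <:+ l ++ [c] := by
        obtain ⟨t, ht⟩ := g1
        exact ⟨t, by rw [← List.append_assoc, ht]⟩
      have hfeq : pvF a b ((pvG a b l).1 ++ [c]) = pvF a b (pvG a b l).1 := by
        rw [pvF_append, hfc]; ring
      refine ⟨hsuf, by rw [hfeq]; exact g2, ?_, g4, ?_⟩
      · intro s hs
        rcases pv_suffix_concat hs with rfl | ⟨s', rfl, hs'⟩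
        · rw [pvF_nil, hfeq]; exact g2
        · have hb1 := g3 s' hs'
          have hb2 : pvF a b (s' ++ [c]) = pvF a b s' + pvF a b [c] := pvF_append a b s' [c]
          rw [hfeq]
          omega
      · rcases g5 with h | ⟨v, hv, hbv, hfv⟩
        · left; exact h
        · right; exact ⟨v, pv_infix_ext hv, hbv, hfv⟩

theorem pvGStep_mv_le (a b : Char) (st : List Char × Int) (c : Char) :
    st.2 ≤ (pvGStep a b st c).2 := by
  unfold pvGStep
  by_cases h1 : c = a ∨ c = b
  · simp only [if_pos h1]
    by_cases h2 : pvF a b (st.1 ++ [c]) < 0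
    · simp only [if_pos h2]
      exact le_refl _
    · simp only [if_neg h2]
      split_ifs
      · exact le_max_left _ _
      · exact le_refl _
  · simp only [if_neg h1]
    exact le_refl _

theorem pvG_mv_mono (a b : Char) (l l' : List Char) :
    (pvG a b l).2 ≤ (pvG a b (l ++ l')).2 := by
  induction l' using List.reverseRecOn with
  | nil => simp
  | append_singleton l' c ih =>
    have : pvG a b (l ++ (l' ++ [c])) = pvGStep a b (pvG a b (l ++ l')) c := by
      simp [pvG, ← List.append_assoc, List.foldl_append]
    rw [this]
    exact le_trans ih (pvGStep_mv_le a b _ c)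

theorem pvG_record (a b : Char) (p : List Char) (c : Char) (hc : c = a ∨ c = b)
    (hb : b ∈ (pvG a b (p ++ [c])).1) (h1 : 1 ≤ pvF a b (pvG a b (p ++ [c])).1) :
    pvF a b (pvG a b (p ++ [c])).1 ≤ (pvG a b (p ++ [c])).2 := by
  have hG : pvG a b (p ++ [c]) = pvGStep a b (pvG a b p) c := by
    simp [pvG, List.foldl_append]
  rw [hG] at hb h1 ⊢
  simp only [pvGStep, if_pos hc] at hb h1 ⊢
  by_cases hres : pvF a b ((pvG a b p).1 ++ [c]) < 0
  · simp only [if_pos hres] at h1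
    rw [pvF_nil] at h1
    omega
  · simp only [if_neg hres] at hb h1 ⊢
    have hcb : 0 < ((pvG a b p).1 ++ [c]).count b := List.count_pos_iff.2 hb
    have hca : 0 < ((pvG a b p).1 ++ [c]).count a := by
      have : pvF a b ((pvG a b p).1 ++ [c]) =
          ((((pvG a b p).1 ++ [c]).count a : Int)) - (((pvG a b p).1 ++ [c]).count b : Int) := rfl
      omega
    rw [if_pos ⟨hca, hcb⟩]
    exact le_max_right _ _

theorem pvG_seg_keep (a b : Char) (hab : a ≠ b) :
    ∀ z : List Char, b ∉ z → ∀ m : List Char, b ∈ (pvG a b m).1 →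
      b ∈ (pvG a b (m ++ z)).1 := by
  intro z
  induction z using List.reverseRecOn with
  | nil => intro _ m hm; simpa using hm
  | append_singleton z c ih =>
    intro hbz m hm
    have hbz' : b ∉ z := fun h => hbz (List.mem_append.2 (Or.inl h))
    have hbc : c ≠ b := fun h => hbz (List.mem_append.2 (Or.inr (by rw [h]; exact List.mem_singleton.2 rfl)))
    have hseg := ih hbz' m hm
    have hG : pvG a b (m ++ (z ++ [c])) = pvGStep a b (pvG a b (m ++ z)) c := by
      simp [pvG, ← List.append_assoc, List.foldl_append]
    rw [hG]
    obtain ⟨_, g2, _, _, _⟩ := pvG_inv a b (m ++ z)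
    by_cases hrel : c = a ∨ c = b
    · have hca : c = a := by
        rcases hrel with h | h
        · exact h
        · exact absurd h hbc
      simp only [pvGStep, if_pos hrel]
      have hnres : ¬ pvF a b ((pvG a b (m ++ z)).1 ++ [c]) < 0 := by
        have h1 : pvF a b ((pvG a b (m ++ z)).1 ++ [c]) =
            pvF a b (pvG a b (m ++ z)).1 + pvF a b [c] := pvF_append a b _ [c]
        have h2 : pvF a b [c] = 1 := by
          rw [hca]; exact pvF_single_a a b hab
        omega
      simp only [if_neg hnres]
      exact List.mem_append.2 (Or.inl hseg)
    · simp only [pvGStep, if_neg hrel]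
      exact List.mem_append.2 (Or.inl hseg)

theorem pvG_reset_struct (a b : Char) (hab : a ≠ b) (l : List Char)
    (hbl : b ∈ l) (hbseg : b ∉ (pvG a b l).1) :
    ∃ p z, l = p ++ b :: z ∧ b ∉ z ∧ (∀ s, s <:+ p → pvF a b s ≤ 0) := by
  obtain ⟨p, z, rfl, hz⟩ := pv_last_occ b l hbl
  refine ⟨p, z, rfl, hz, ?_⟩
  have hG : pvG a b (p ++ [b]) = pvGStep a b (pvG a b p) b := by
    simp [pvG, List.foldl_append]
  by_cases hres : pvF a b ((pvG a b p).1 ++ [b]) < 0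
  · intro s hs
    obtain ⟨_, g2, g3, _, _⟩ := pvG_inv a b p
    have h1 : pvF a b ((pvG a b p).1 ++ [b]) =
        pvF a b (pvG a b p).1 + pvF a b [b] := pvF_append a b _ [b]
    have h2 : pvF a b [b] = -1 := pvF_single_b a b hab
    have := g3 s hs
    omega
  · exfalso
    have hbseg1 : b ∈ (pvG a b (p ++ [b])).1 := by
      rw [hG]
      simp only [pvGStep, or_true, if_true, if_neg hres]
      exact List.mem_append.2 (Or.inr (List.mem_singleton.2 rfl))
    have := pvG_seg_keep a b hab z hz (p ++ [b]) hbseg1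
    rw [List.append_assoc] at this
    exact hbseg (by simpa using this)

theorem pvG_step_cases (a b : Char) (p : List Char) (c : Char) (hc : c = a ∨ c = b) :
    (pvG a b (p ++ [c])).1 = [] ∨ (pvG a b (p ++ [c])).1 = (pvG a b p).1 ++ [c] := by
  have hG : pvG a b (p ++ [c]) = pvGStep a b (pvG a b p) c := by
    simp [pvG, List.foldl_append]
  rw [hG]
  simp only [pvGStep, if_pos hc]
  split_ifs <;> simp

theorem pvG_capture (a b : Char) (p₀ : List Char) (c : Char) (hc : c = a ∨ c = b) (x : Int)
    (hx : 1 ≤ x) (hsuf : x ≤ pvF a b (pvG a b (p₀ ++ [c])).1)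
    (hbseg : b ∈ (pvG a b (p₀ ++ [c])).1) : x ≤ (pvG a b (p₀ ++ [c])).2 :=
  le_trans hsuf (pvG_record a b p₀ c hc hbseg (le_trans hx hsuf))

theorem pvG_last_b (a b c : Char) (hc : c = b) (p₀ : List Char)
    (h1 : 1 ≤ pvF a b (pvG a b (p₀ ++ [c])).1) : b ∈ (pvG a b (p₀ ++ [c])).1 := by
  rcases pvG_step_cases a b p₀ c (Or.inr hc) with he | he
  · rw [he, pvF_nil] at h1; omega
  · rw [he, hc]
    exact List.mem_append.2 (Or.inr (List.mem_singleton.2 rfl))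

theorem pvA_complete (a b : Char) (hab : a ≠ b) :
    ∀ n : Nat, ∀ l u v w : List Char, l = u ++ v ++ w → b ∈ v → v.length ≤ n →
      1 ≤ pvF a b v → (∀ v', v' <:+: l → b ∈ v' → pvF a b v' ≤ pvF a b v) →
      pvF a b v ≤ max (pvG a b l).2 (pvG a b l.reverse).2 := by
  intro n
  induction n with
  | zero =>
    intro l u v w hl hbv hlen h1 hopt
    rw [List.length_eq_zero_iff.1 (Nat.le_zero.1 hlen)] at hbv
    cases hbv
  | succ n ih =>
    intro l u v w hl hbv hlen h1 hopt
    rcases v.eq_nil_or_concat with rfl | ⟨v₀, cl, rfl⟩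
    · cases hbv
    simp only [List.concat_eq_append] at hl hbv hlen h1 hopt ⊢
    by_cases hcl : cl = a ∨ cl = b
    · by_cases hclb : cl = b
      · -- last char of v is b: the forward scan records pvF v at prefix u ++ v
        have hp : l = ((u ++ v₀) ++ [cl]) ++ w := by rw [hl]; simp [List.append_assoc]
        obtain ⟨_, _, g3, _, _⟩ := pvG_inv a b ((u ++ v₀) ++ [cl])
        have hsufv : v₀ ++ [cl] <:+ (u ++ v₀) ++ [cl] := ⟨u, by simp⟩
        have hfs : pvF a b (v₀ ++ [cl]) ≤ pvF a b (pvG a b ((u ++ v₀) ++ [cl])).1 :=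
          g3 _ hsufv
        have hbseg : b ∈ (pvG a b ((u ++ v₀) ++ [cl])).1 :=
          pvG_last_b a b cl hclb (u ++ v₀) (le_trans h1 hfs)
        have hrec := pvG_capture a b (u ++ v₀) cl hcl _ h1 hfs hbseg
        have hmono := pvG_mv_mono a b ((u ++ v₀) ++ [cl]) w
        rw [← hp] at hmono
        exact le_trans (le_trans hrec hmono) (le_max_left _ _)
      · have hcla : cl = a := hcl.resolve_right hclb
        cases v₀ with
        | nil =>
          exfalso
          rcases List.mem_singleton.1 (by simpa using hbv) with h
          rw [hcla] at h; exact hab h.symm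
        | cons ch v₀' =>
          -- v = ch :: (v₀' ++ [cl]); write t for the tail
          have hv : ch :: v₀' ++ [cl] = ch :: (v₀' ++ [cl]) := by simp
          by_cases hch : ch = a ∨ ch = b
          · -- head of v relevant: the reverse scan is examined at prefix rev w ++ rev v
            have hP : l.reverse = ((w.reverse ++ (v₀' ++ [cl]).reverse) ++ [ch]) ++ u.reverse := by
              rw [hl]; simp [List.reverse_append, List.append_assoc]
            have hrevv : (ch :: v₀' ++ [cl]).reverse = (v₀' ++ [cl]).reverse ++ [ch] := by
              simp
            obtain ⟨_, _, g3, _, _⟩ := pvG_inv a b ((w.reverse ++ (v₀' ++ [cl]).reverse) ++ [ch])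
            have hsufv : (ch :: v₀' ++ [cl]).reverse <:+ (w.reverse ++ (v₀' ++ [cl]).reverse) ++ [ch] := by
              rw [hrevv]
              exact ⟨w.reverse, by simp⟩
            have hfs : pvF a b (ch :: v₀' ++ [cl]) ≤
                pvF a b (pvG a b ((w.reverse ++ (v₀' ++ [cl]).reverse) ++ [ch])).1 := by
              have := g3 _ hsufv
              rwa [pvF_reverse] at this
            by_cases hbseg : b ∈ (pvG a b ((w.reverse ++ (v₀' ++ [cl]).reverse) ++ [ch])).1
            · -- segment since reset contains b: reverse scan records
              have hrec := pvG_capture a b (w.reverse ++ (v₀' ++ [cl]).reverse) ch hch _ h1 hfs hbseg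
              have hmono := pvG_mv_mono a b ((w.reverse ++ (v₀' ++ [cl]).reverse) ++ [ch]) u.reverse
              rw [← hP] at hmono
              exact le_trans (le_trans hrec hmono) (le_max_right _ _)
            · -- no b since the last reverse reset: build a shorter optimal witness
              have hbP : b ∈ (w.reverse ++ (v₀' ++ [cl]).reverse) ++ [ch] := by
                have hbrev : b ∈ (ch :: v₀' ++ [cl]).reverse := List.mem_reverse.2 hbv
                rw [hrevv] at hbrev
                rcases List.mem_append.1 hbrev with h' | h'
                · exact List.mem_append.2 (Or.inl (List.mem_append.2 (Or.inr h')))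
                · exact List.mem_append.2 (Or.inr h')
              obtain ⟨p, z, hPz, hbz, hsle⟩ :=
                pvG_reset_struct a b hab ((w.reverse ++ (v₀' ++ [cl]).reverse) ++ [ch]) hbP hbseg
              -- translate: v ++ w reversed equals p ++ b :: z
              have hvw : (ch :: v₀' ++ [cl]) ++ w = z.reverse ++ b :: p.reverse := by
                have h0 : ((ch :: v₀' ++ [cl]) ++ w).reverse = p ++ b :: z := by
                  rw [← hPz]; simp [List.reverse_append, List.append_assoc]
                have := congrArg List.reverse h0
                simpa [List.reverse_append] using this
              obtain ⟨v₁, v₂, hv12, hbv1⟩ := pv_first_occ b (ch :: v₀' ++ [cl]) hbv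
              have hvw2 : v₁ ++ b :: (v₂ ++ w) = z.reverse ++ b :: p.reverse := by
                rw [← hvw, hv12]; simp
              have hbz' : b ∉ z.reverse := fun h => hbz (List.mem_reverse.1 h)
              obtain ⟨hv1z, hv2p⟩ := pv_first_occ_uniq v₁ z.reverse (v₂ ++ w) p.reverse hvw2 hbv1 hbz'
              -- pvF v₂ ≤ 0 because rev v₂ is a suffix of p
              have hfv2 : pvF a b v₂ ≤ 0 := by
                have hsuf2 : v₂.reverse <:+ p := by
                  have h0 : w.reverse ++ v₂.reverse = p := by
                    have := congrArg List.reverse hv2p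
                    simpa [List.reverse_append] using this
                  exact ⟨w.reverse, h0⟩
                have := hsle v₂.reverse hsuf2
                rwa [pvF_reverse] at this
              -- the shorter witness v₁ ++ [b]
              have hfsplit : pvF a b (ch :: v₀' ++ [cl]) =
                  pvF a b (v₁ ++ [b]) + pvF a b v₂ := by
                rw [hv12]
                have : v₁ ++ b :: v₂ = (v₁ ++ [b]) ++ v₂ := by simp
                rw [this, pvF_append]
              have hinf : (v₁ ++ [b]) <:+: l := by
                refine ⟨u, v₂ ++ w, ?_⟩
                rw [hl, hv12]
                simp [List.append_assoc]
              have hble : pvF a b (v₁ ++ [b]) ≤ pvF a b (ch :: v₀' ++ [cl]) :=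
                hopt _ hinf (List.mem_append.2 (Or.inr (List.mem_singleton.2 rfl)))
              have hfeq : pvF a b (v₁ ++ [b]) = pvF a b (ch :: v₀' ++ [cl]) := by omega
              -- v₂ ≠ [] since the last char of v is a, not b
              have hv2ne : v₂ ≠ [] := by
                intro h
                rw [h] at hv12
                have h0 : v₁ ++ [b] = (ch :: v₀') ++ [cl] := by
                  rw [← hv12]
                have h1' := (List.append_inj' h0 rfl).2
                simp at h1'
                rw [hcla] at h1'
                exact hab h1'.symm
              -- lengths
              have hlen2 : (v₁ ++ [b]).length ≤ n := by
                have h1l : (ch :: v₀' ++ [cl]).length = v₁.length + 1 + v₂.length := by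
                  rw [hv12]; simp; omega
                have h2l : v₂.length ≠ 0 := fun h => hv2ne (List.length_eq_zero_iff.1 h)
                simp only [List.length_append, List.length_cons, List.length_nil] at hlen h1l ⊢
                omega
              have hres := ih l u (v₁ ++ [b]) (v₂ ++ w)
                (by rw [hl, hv12]; simp [List.append_assoc])
                (List.mem_append.2 (Or.inr (List.mem_singleton.2 rfl)))
                hlen2 (by rw [hfeq]; exact h1)
                (by intro v' hv' hbv'; rw [hfeq]; exact hopt v' hv' hbv')
              rw [hfeq] at hres
              exact hres
          · -- head of v irrelevant: shrink the front
            push_neg at hch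
            have hbt : b ∈ v₀' ++ [cl] := by
              rcases List.mem_cons.1 hbv with h' | h'
              · exact absurd h'.symm hch.2
              · exact h'
            have hft : pvF a b (v₀' ++ [cl]) = pvF a b (ch :: v₀' ++ [cl]) := by
              have h0 : pvF a b (ch :: v₀' ++ [cl]) = pvF a b [ch] + pvF a b (v₀' ++ [cl]) := by
                rw [show (ch :: v₀' ++ [cl] : List Char) = [ch] ++ (v₀' ++ [cl]) from rfl,
                  pvF_append]
              rw [h0, pvF_single_o a b ch hch.1 hch.2]
              ring
            have hres := ih l (u ++ [ch]) (v₀' ++ [cl]) w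
              (by rw [hl]; simp [List.append_assoc])
              hbt
              (by simp only [List.length_append, List.length_cons] at hlen ⊢; omega)
              (by rw [hft]; exact h1)
              (by intro v' hv' hbv'; rw [hft]; exact hopt v' hv' hbv')
            rw [hft] at hres
            exact hres
    · -- last char of v irrelevant: shrink the back
      push_neg at hcl
      have hbt : b ∈ v₀ := by
        rcases List.mem_append.1 hbv with h' | h'
        · exact h'
        · simp at h'; exact absurd h'.symm hcl.2
      have hft : pvF a b v₀ = pvF a b (v₀ ++ [cl]) := by
        rw [pvF_append, pvF_single_o a b cl hcl.1 hcl.2]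
        ring
      have hres := ih l u v₀ (cl :: w)
        (by rw [hl]; simp [List.append_assoc])
        hbt
        (by simp only [List.length_append, List.length_cons, List.length_nil] at hlen ⊢; omega)
        (by rw [hft]; exact h1)
        (by intro v' hv' hbv'; rw [hft]; exact hopt v' hv' hbv')
      rw [hft] at hres
      exact hres

theorem pvPairA_eq_spec {a b : Char} (hab : a ≠ b) (l : List Char) :
    max (pvG a b l).2 (pvG a b l.reverse).2 = pvSpec a b l := by
  obtain ⟨_, _, _, g4, g5⟩ := pvG_inv a b l
  obtain ⟨_, _, _, g4r, g5r⟩ := pvG_inv a b l.reverse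
  refine le_antisymm ?_ ?_
  · refine max_le ?_ ?_
    · rcases g5 with h | ⟨v, hv, hbv, hfv⟩
      · rw [h]; exact pvSpec_nonneg a b l
      · rw [← hfv]; exact pvSpec_le_of_infix hv hbv
    · rcases g5r with h | ⟨v, hv, hbv, hfv⟩
      · rw [h]; exact pvSpec_nonneg a b l
      · rw [← hfv, ← pvSpec_reverse a b l]; exact pvSpec_le_of_infix hv hbv
  · rcases pvSpec_cases a b l with h0 | ⟨v, hv, hbv, hfv⟩
    · rw [h0]; exact le_trans g4 (le_max_left _ _)
    · by_cases h1 : 1 ≤ pvSpec a b l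
      · obtain ⟨u, w, hl⟩ := hv
        have := pvA_complete a b hab v.length l u v w hl.symm hbv (le_refl _)
          (by rw [hfv]; exact h1)
          (by intro v' hv' hbv'; rw [hfv]; exact pvSpec_le_of_infix hv' hbv')
        rw [hfv] at this
        exact this
      · have h2 := pvSpec_nonneg a b l
        have h3 : pvSpec a b l = 0 := by omega
        rw [h3]; exact le_trans g4 (le_max_left _ _)

theorem pv_foldl_append_h {α β : Type} (h : α → List β) :
    ∀ (u : List α) (init : List β),
      u.foldl (fun acc x => acc ++ h x) init = init ++ u.flatMap h := by
  intro u
  induction u with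
  | nil => intro init; simp
  | cons x u ih =>
    intro init
    simp only [List.foldl_cons, List.flatMap_cons, ih, List.append_assoc]

theorem pv_inner_pairs (u : List Char) (a : Char) :
    ∀ acc : List (Char × Char),
      u.foldl (fun acc b => if a = b then acc else acc ++ [(a, b)]) acc =
        acc ++ u.filterMap (fun b => if a = b then none else some (a, b)) := by
  induction u with
  | nil => intro acc; simp
  | cons x u ih =>
    intro acc
    simp only [List.foldl_cons, List.filterMap_cons]
    by_cases hax : a = x
    · rw [if_pos hax, if_pos hax, ih]
    · rw [if_neg hax, if_neg hax, ih, List.append_assoc]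
      rfl

theorem pvPairsA_eq (u : List Char) :
    pvPairsA u = u.flatMap (fun a => u.filterMap
      (fun b => if a = b then none else some (a, b))) := by
  unfold pvPairsA
  have hfn : (fun (acc : List (Char × Char)) a =>
      u.foldl (fun acc b => if a = b then acc else acc ++ [(a, b)]) acc) =
      fun acc a => acc ++ u.filterMap (fun b => if a = b then none else some (a, b)) := by
    funext acc a
    exact pv_inner_pairs u a acc
  rw [hfn, pv_foldl_append_h]
  simp

theorem pvPairsA_mem {u : List Char} {p : Char × Char} (h : p ∈ pvPairsA u) : p.1 ≠ p.2 := by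
  rw [pvPairsA_eq] at h
  simp only [List.mem_flatMap, List.mem_filterMap] at h
  obtain ⟨a, _, b, _, hif⟩ := h
  by_cases hab : a = b
  · rw [if_pos hab] at hif; cases hif
  · rw [if_neg hab] at hif
    cases hif
    exact hab

theorem pvCheckA_fold (t : List Char) :
    ∀ pairs : List (Char × Char), (∀ p ∈ pairs, p.1 ≠ p.2) → ∀ m : Int, 0 ≤ m →
      pairs.foldl (fun mv p => (t.foldl (pvStepA p.1 p.2) ((0:Int), (0:Int), mv)).2.2) m =
        pairs.foldl (fun m p => max m (pvG p.1 p.2 t).2) m := by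
  intro pairs
  induction pairs with
  | nil => intro _ m _; rfl
  | cons p ps ih =>
    intro hne m hm
    simp only [List.foldl_cons]
    have hinner : (t.foldl (pvStepA p.1 p.2) ((0:Int), (0:Int), m)).2.2 =
        max m (pvG p.1 p.2 t).2 := by
      rw [pvA_thread p.1 p.2 t m hm,
        pvA_eq_ghost p.1 p.2 (hne p List.mem_cons_self) t]
    rw [hinner]
    exact ih (fun q hq => hne q (List.mem_cons_of_mem _ hq)) _
      (le_trans hm (le_max_left _ _))

theorem pv_fold_max_par (g₁ g₂ : Char × Char → Int) :
    ∀ (ps : List (Char × Char)) (m₁ m₂ : Int),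
      max (ps.foldl (fun m p => max m (g₁ p)) m₁) (ps.foldl (fun m p => max m (g₂ p)) m₂) =
        ps.foldl (fun m p => max m (max (g₁ p) (g₂ p))) (max m₁ m₂) := by
  intro ps
  induction ps with
  | nil => intro m₁ m₂; rfl
  | cons p ps ih =>
    intro m₁ m₂
    simp only [List.foldl_cons]
    rw [ih]
    congr 1
    exact max_max_max_comm m₁ (g₁ p) m₂ (g₂ p)

theorem pv_fold_max_congr (g₁ g₂ : Char × Char → Int) :
    ∀ (ps : List (Char × Char)) (m : Int), (∀ p ∈ ps, g₁ p = g₂ p) →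
      ps.foldl (fun m p => max m (g₁ p)) m = ps.foldl (fun m p => max m (g₂ p)) m := by
  intro ps
  induction ps with
  | nil => intro m _; rfl
  | cons p ps ih =>
    intro m h
    simp only [List.foldl_cons]
    rw [h p List.mem_cons_self]
    exact ih _ (fun q hq => h q (List.mem_cons_of_mem _ hq))

theorem pv_if_max (x y : Int) : (if x < y then y else x) = max x y := by
  rw [max_def]
  split_ifs <;> omega

theorem pv_foldl_flatMap (g : Int → Char × Char → Int) (h : Char → List (Char × Char)) :
    ∀ (u : List Char) (m : Int),
      (u.flatMap h).foldl g m = u.foldl (fun m x => (h x).foldl g m) m := by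
  intro u
  induction u with
  | nil => intro m; rfl
  | cons x u ih =>
    intro m
    simp only [List.flatMap_cons, List.foldl_append, List.foldl_cons, ih]

theorem pv_inner_B (t : List Char) (a : Char) :
    ∀ (u : List Char) (m : Int),
      u.foldl (fun best b => if a = b then best
        else
          let ans := pvPairB a b t
          if best < ans then ans else best) m =
      (u.filterMap (fun b => if a = b then none else some (a, b))).foldl
        (fun m p => max m (pvPairB p.1 p.2 t)) m := by
  intro u
  induction u with
  | nil => intro m; rfl
  | cons x u ih =>
    intro m
    simp only [List.foldl_cons, List.filterMap_cons]
    by_cases hax : a = x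
    · rw [if_pos hax, if_pos hax]
      exact ih m
    · rw [if_neg hax, if_neg hax]
      simp only [List.foldl_cons]
      rw [ih]
      congr 1
      exact pv_if_max _ _

theorem pvB_fold (t : List Char) (chars : List Char) :
    chars.foldl (fun best a => chars.foldl (fun best b =>
        if a = b then best
        else
          let ans := pvPairB a b t
          if best < ans then ans else best) best) 0 =
      (pvPairsA chars).foldl (fun m p => max m (pvPairB p.1 p.2 t)) 0 := by
  rw [pvPairsA_eq, pv_foldl_flatMap]
  suffices h : ∀ (v : List Char) (m : Int),
      v.foldl (fun best a => chars.foldl (fun best b =>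
        if a = b then best
        else
          let ans := pvPairB a b t
          if best < ans then ans else best) best) m =
      v.foldl (fun m a => (chars.filterMap (fun b => if a = b then none else some (a, b))).foldl
        (fun m p => max m (pvPairB p.1 p.2 t)) m) m by
    exact h chars 0
  intro v
  induction v with
  | nil => intro m; rfl
  | cons x v ih =>
    intro m
    simp only [List.foldl_cons]
    rw [pv_inner_B, ih]

-- ===== VERDICT (by name: the statement is the Claim_ definition above) =====
theorem largestVariance_spec : Claim_equal_largestVariance := by
  intro s _
  show largestVariance s = largestVariance_alt s
  unfold largestVariance largestVariance_alt
  dsimp only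
  rw [PySem.List.dedup_eq_ofList]
  rw [pvB_fold s.toList (PySem.Set.ofList s.toList)]
  unfold pvCheckA
  rw [pvCheckA_fold s.toList (pvPairsA (PySem.Set.ofList s.toList))
      (fun p hp => pvPairsA_mem hp) 0 le_rfl,
    pvCheckA_fold s.toList.reverse (pvPairsA (PySem.Set.ofList s.toList))
      (fun p hp => pvPairsA_mem hp) 0 le_rfl,
    pv_fold_max_par]
  have hmax0 : max (0 : Int) 0 = 0 := rfl
  rw [hmax0]
  refine pv_fold_max_congr _ _ (pvPairsA (PySem.Set.ofList s.toList)) 0 ?_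
  intro p hp
  rw [pvPairA_eq_spec (pvPairsA_mem hp) s.toList, pvPairB_eq_spec (pvPairsA_mem hp) s.toList]
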